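-- pv_equiv track=rewrite | github.com/cbell98/Helper_Functions | module10.py | solution
-- ===== SOURCE A (Python) =====
-- def solution(s):
--
-- # Separate string s into list of words s (do i need to do this?)
--     s = s.split()
--
--     cache = {}
--
--     for word in s:
--         if word not in cache:
--             cache[word] = ""
--
--         cache[word] += "#"
--
--     result = []
--
--     for word in cache:
--         result.append(f"{word}: {cache[word]}")
--
--     result.sort()
--
--     return result
-- ===== SOURCE B (Python) =====
-- def solution(s):
--     # sort-then-group run-length scan instead of dict counting
--     out = []
--     words = sorted(s.split())
--     while words:
--         w = words[0]
--         rest = words[1:]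
--         run = 1
--         while rest and rest[0] == w:
--             run += 1
--             rest = rest[1:]
--         out.append(w + ": " + "#" * run)
--         words = rest
--     out.sort()
--     return out
-- ===== Notes on version B (the rewrite author's own statement) =====
-- stated objective: alternative
-- what changed: Replaces A's dict-of-strings accumulation and final formatting pass by sorting the word list first and emitting one formatted string per run in a single run-length scan over the sorted list.
import Mathlib
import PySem

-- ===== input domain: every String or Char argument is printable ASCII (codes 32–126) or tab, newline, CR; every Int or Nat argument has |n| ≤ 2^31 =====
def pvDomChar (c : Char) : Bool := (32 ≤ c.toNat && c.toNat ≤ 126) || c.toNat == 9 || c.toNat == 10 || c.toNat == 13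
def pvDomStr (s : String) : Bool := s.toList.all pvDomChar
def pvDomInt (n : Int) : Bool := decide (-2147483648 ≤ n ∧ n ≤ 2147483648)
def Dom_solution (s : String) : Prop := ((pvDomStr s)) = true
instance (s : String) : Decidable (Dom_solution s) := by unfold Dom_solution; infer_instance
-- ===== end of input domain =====

-- B replaces A's dict-of-strings accumulation by a sort-then-run-length scan; alternative decomposition, same cost.

-- ===== PORT A =====
def solution (s : String) : List String :=
  let ws := PySem.Str.split₀ s
  let cache := ws.foldl (fun d w =>
      let d := if d.contains w then d else d.insert w ""
      d.insert w ((d.getD w "") ++ "#")) PySem.Dict.empty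
  let result := cache.keys.foldl (fun r w => r ++ [w ++ ": " ++ cache.getD w ""]) ([] : List String)
  PySem.List.sorted result (fun x => x) false

-- ===== PORT B =====
-- run-length scan over a (sorted) word list: one formatted string per run
def runScan : List String → List String
  | [] => []
  | w :: rest =>
      (w ++ ": " ++ String.ofList (List.replicate (1 + (rest.takeWhile (fun x => x == w)).length) '#'))
        :: runScan (rest.dropWhile (fun x => x == w))
termination_by l => l.length
decreasing_by
  simpa using Nat.lt_succ_of_le (List.length_dropWhile_le _ _)

def solution_alt (s : String) : List String :=
  PySem.List.sorted
    (runScan (PySem.List.sorted (PySem.Str.split₀ s) (fun x => x) false))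
    (fun x => x) false

-- ===== PRECONDITION & SPEC =====
def Spec_solution (s : String) (out : List String) : Prop := out = solution_alt s
instance (s : String) (out : List String) : Decidable (Spec_solution s out) := by unfold Spec_solution; infer_instance

-- ===== CLAIM (what is proved, stated in full; the proofs are below) =====
def Claim_equal_solution : Prop := ∀ (s : String), Dom_solution s → Spec_solution s (solution s)

-- ===== LEMMAS AND PROOFS =====

-- A's loop body (setdefault-then-append) is a single modify
theorem step_eq (d : PySem.Dict String String) (w : String) :
    ((if d.contains w then d else d.insert w "").insert w
      (((if d.contains w then d else d.insert w "").getD w "") ++ "#")) = d.modify w "" (· ++ "#") := by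
  have hm : d.modify w "" (· ++ "#") = d.insert w ((d.getD w "") ++ "#") := by
    simp [PySem.Dict.modify, PySem.Dict.insert, PySem.Dict.getD]
  by_cases h : d.contains w = true
  · simp [h, hm]
  · simp only [Bool.not_eq_true] at h
    rw [hm, if_neg (by simp [h]), PySem.Dict.getD_insert_self, PySem.Dict.insert_insert_self,
      PySem.Dict.getD_of_not_contains (h := h)]

theorem hstep : (fun (d : PySem.Dict String String) (w : String) =>
    let d' := if d.contains w then d else d.insert w ""
    d'.insert w ((d'.getD w "") ++ "#")) = fun d w => d.modify w "" (· ++ "#") := by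
  funext d w
  exact step_eq d w

-- the cache's value at k is '#' times the number of occurrences of k
theorem getD_fold (l : List String) (d : PySem.Dict String String) (k : String) :
    (l.foldl (fun d x => d.modify x "" (· ++ "#")) d).getD k ""
      = d.getD k "" ++ String.ofList (List.replicate (l.count k) '#') := by
  induction l generalizing d with
  | nil => simp
  | cons w t ih =>
    rw [List.foldl_cons, ih]
    by_cases h : k = w
    · subst h
      rw [PySem.Dict.getD_modify_self, List.count_cons_self, List.replicate_succ,
        show ('#' :: List.replicate (t.count k) '#') = ['#'] ++ List.replicate (t.count k) '#' from rfl,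
        String.ofList_append, String.append_assoc]
    · rw [PySem.Dict.getD_modify_of_ne]
      · simp [Ne.symm h]
      · exact h

-- A's result-building loop is a map
theorem foldl_append_map {α β : Type} (l : List α) (g : α → β) (acc : List β) :
    l.foldl (fun r x => r ++ [g x]) acc = acc ++ l.map g := by
  induction l generalizing acc with
  | nil => simp
  | cons x t ih => simp [ih]

theorem set_add_cons {α : Type} [BEq α] [LawfulBEq α] (s : List α) (w x : α) (hx : x ≠ w) :
    PySem.Set.add (w :: s) x = w :: PySem.Set.add s x := by
  by_cases hm : x ∈ s <;>
    simp [PySem.Set.add, PySem.Set.contains, hx, hm]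

theorem foldl_add_cons {α : Type} [BEq α] [LawfulBEq α] (l : List α) (w : α) (s : List α)
    (h : ∀ x ∈ l, x ≠ w) :
    l.foldl PySem.Set.add (w :: s) = w :: l.foldl PySem.Set.add s := by
  induction l generalizing s with
  | nil => rfl
  | cons x t ih =>
    rw [List.foldl_cons, set_add_cons s w x (h x (by simp)), List.foldl_cons,
      ih _ (fun y hy => h y (by simp [hy]))]

theorem foldl_add_const {α : Type} [BEq α] [LawfulBEq α] (t : List α) (w : α)
    (h : ∀ x ∈ t, x = w) (r : List α) :
    (t ++ r).foldl PySem.Set.add [w] = r.foldl PySem.Set.add [w] := by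
  induction t with
  | nil => rfl
  | cons x t' ih =>
    have hx := h x (by simp)
    subst hx
    have h1 : PySem.Set.add [x] x = [x] := by
      simp [PySem.Set.add, PySem.Set.contains]
    simp only [List.cons_append, List.foldl_cons, h1]
    exact ih (fun y hy => h y (by simp [hy]))

-- first-occurrence dedup of w :: (run of w ++ rest without w)
theorem ofList_cons_sorted {α : Type} [BEq α] [LawfulBEq α] (w : α) (t r : List α)
    (ht : ∀ x ∈ t, x = w) (hr : ∀ x ∈ r, x ≠ w) :
    PySem.Set.ofList (w :: (t ++ r)) = w :: PySem.Set.ofList r := by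
  show ((w :: (t ++ r)).foldl PySem.Set.add []) = _
  rw [List.foldl_cons]
  have h1 : PySem.Set.add ([] : List α) w = [w] := rfl
  rw [h1, foldl_add_const t w ht r, show ([w] : List α) = w :: [] from rfl,
    foldl_add_cons r w [] hr]
  rfl

-- after dropping the leading run of w from a sorted tail, w never reappears
theorem drop_ne (rest : List String) (w : String)
    (hwle : ∀ x ∈ rest, w ≤ x) (hrest : rest.Pairwise (· ≤ ·)) :
    ∀ x ∈ rest.dropWhile (fun x => x == w), x ≠ w := by
  induction rest with
  | nil => simp
  | cons a tl ih =>
    by_cases ha : (a == w) = true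
    · rw [List.dropWhile_cons, if_pos ha]
      exact ih (fun x hx => hwle x (List.mem_cons_of_mem _ hx)) (List.pairwise_cons.mp hrest).2
    · rw [List.dropWhile_cons, if_neg (by simp [ha])]
      have haw : a ≠ w := by simpa using ha
      have hwa : w < a := lt_of_le_of_ne (hwle a (by simp)) (Ne.symm haw)
      intro x hx
      rcases List.mem_cons.mp hx with rfl | hx'
      · exact haw
      · have : a ≤ x := (List.pairwise_cons.mp hrest).1 x hx'
        exact fun hxw => absurd (hxw ▸ this) (not_le.mpr hwa)

-- the run-length scan of a sorted list formats each distinct word with its count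
theorem runScan_sorted (l : List String) (h : l.Pairwise (· ≤ ·)) :
    runScan l = (PySem.Set.ofList l).map
      (fun k => k ++ ": " ++ String.ofList (List.replicate (l.count k) '#')) := by
  induction l using runScan.induct with
  | case1 => simp [runScan, PySem.Set.ofList]
  | case2 w rest ih =>
    set t := rest.takeWhile (fun x => x == w) with htdef
    set r := rest.dropWhile (fun x => x == w) with hrdef
    have hsplit : rest = t ++ r := (List.takeWhile_append_dropWhile).symm
    have ht : ∀ x ∈ t, x = w := by
      intro x hx
      have := List.mem_takeWhile_imp hx
      simpa using this
    have hwle : ∀ x ∈ rest, w ≤ x := (List.pairwise_cons.mp h).1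
    have hrest : rest.Pairwise (· ≤ ·) := (List.pairwise_cons.mp h).2
    have hrp : r.Pairwise (· ≤ ·) := hrest.sublist (List.dropWhile_sublist _)
    have hr : ∀ x ∈ r, x ≠ w := drop_ne rest w hwle hrest
    have hofl : PySem.Set.ofList (w :: rest) = w :: PySem.Set.ofList r := by
      rw [hsplit]; exact ofList_cons_sorted w t r ht hr
    have hcw : (w :: rest).count w = 1 + t.length := by
      rw [hsplit, List.count_cons_self, List.count_append]
      rw [List.count_eq_length.mpr (fun b hb => by simp [ht b hb]),
        List.count_eq_zero.mpr (fun hm => hr w hm rfl)]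
      omega
    have hck : ∀ k ∈ r, (w :: rest).count k = r.count k := by
      intro k hk
      have hkw : k ≠ w := hr k hk
      rw [hsplit]
      have h1 : t.count k = 0 := List.count_eq_zero.mpr (fun hm => hkw (ht k hm))
      simp [List.count_append, h1, Ne.symm hkw]
    rw [runScan, hofl, List.map_cons, ih hrp]
    congr 1
    · rw [hcw]
    · apply List.map_congr_left
      intro k hk
      have : k ∈ r := (PySem.Set.mem_ofList (xs := r) (y := k)).mp hk
      rw [hck k this]

-- A's result before the final sort, as a map over the distinct words
theorem solution_eq_map (s : String) :
    solution s = PySem.List.sorted ((PySem.Set.ofList (PySem.Str.split₀ s)).map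
      (fun k => k ++ ": " ++ String.ofList (List.replicate ((PySem.Str.split₀ s).count k) '#')))
      (fun x => x) false := by
  simp only [solution]
  rw [hstep, foldl_append_map]
  have hkeys : ((PySem.Str.split₀ s).foldl (fun d w => d.modify w "" (· ++ "#"))
      PySem.Dict.empty).keys = PySem.Set.ofList (PySem.Str.split₀ s) := by
    rw [PySem.Dict.keys_foldl_modify]
    rfl
  rw [hkeys, List.nil_append]
  congr 1
  apply List.map_congr_left
  intro k _
  rw [getD_fold]
  simp

theorem solution_main (s : String) : solution s = solution_alt s := by
  rw [solution_eq_map]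
  unfold solution_alt
  have hsws : (PySem.List.sorted (PySem.Str.split₀ s) (fun x => x) false).Pairwise (· ≤ ·) := by
    simpa using PySem.List.sorted_pairwise (PySem.Str.split₀ s) (fun x => x)
  rw [runScan_sorted _ hsws]
  have hperm0 : (PySem.List.sorted (PySem.Str.split₀ s) (fun x => x) false).Perm
      (PySem.Str.split₀ s) := PySem.List.sorted_perm _ _ _
  have hmap : (PySem.Set.ofList (PySem.List.sorted (PySem.Str.split₀ s) (fun x => x) false)).map
        (fun k => k ++ ": " ++ String.ofList (List.replicate
          ((PySem.List.sorted (PySem.Str.split₀ s) (fun x => x) false).count k) '#'))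
      = (PySem.Set.ofList (PySem.List.sorted (PySem.Str.split₀ s) (fun x => x) false)).map
        (fun k => k ++ ": " ++ String.ofList (List.replicate ((PySem.Str.split₀ s).count k) '#')) := by
    apply List.map_congr_left
    intro k _
    rw [hperm0.count_eq]
  rw [hmap]
  apply PySem.List.sorted_eq_sorted_of_perm _ _ _ (fun a b hab => hab)
  apply List.Perm.map
  rw [List.perm_ext_iff_of_nodup (PySem.Set.nodup_ofList _) (PySem.Set.nodup_ofList _)]
  intro a
  rw [PySem.Set.mem_ofList, PySem.Set.mem_ofList, PySem.List.mem_sorted]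

-- ===== VERDICT (by name: the statement is the Claim_ definition above) =====
theorem solution_spec : Claim_equal_solution := by
  intro s _
  unfold Spec_solution
  exact solution_main s
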